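-- pv_equiv track=rewrite | github.com/mykytatishkin/PyBlockChain | lab1/firstTask/Utils/helper.py | preprocessMessage
-- ===== SOURCE A (Python) =====
-- def translate(message):
--     charcodes = [ord(c) for c in message]
--     bytes = []
--     for char in charcodes:
--         bytes.append(bin(char)[2:].zfill(8))
--         # bin(char)[2:]: This part of the code slices the binary string to remove the '0b' prefix,
--         # so you're left with just the binary representation. In the example of bin(65), this would yield '1000001'.
--
--         # zfill(8): The zfill() method is used to pad the binary string with leading zeros (if necessary) to ensure
--         # it's 8 characters long. This is done because ASCII characters are typically represented using 8 bits (1 byte).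
--         # For example, if the binary string is '1000001', it doesn't need padding.
--         # But if it's '101', it will be padded to '00000101'.
--
--     bits = []
--     for byte in bytes:
--         for bit in byte:
--             bits.append(int(bit))
--     return bits
--
-- def chunker(bits, chunk_length=8):
--     # divides list of bits into desired byte/word chunks,
--     # starting at LSB
--     chunked = []
--     for b in range(0, len(bits), chunk_length):
--         chunked.append(bits[b:b + chunk_length])
--     return chunked
--
-- def fillZeros(bits, length=8, endian='LE'):
--     l = len(bits)
--     if endian == 'LE':
--         for i in range(l, length):
--             bits.append(0)
--     else:
--         while l < length:
--             bits.insert(0, 0)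
--             l = len(bits)
--     return bits
--
-- def preprocessMessage(message):
--     # translate message into bits
--     bits = translate(message)
--     # message length
--     length = len(bits)
--     # get length in bits  of message (64 bit block)
--     message_len = [int(b) for b in bin(length)[2:].zfill(64)]
--     # if length smaller than 448 handle block individually otherwise
--     # if exactly 448 then add single 1 and add up to 1024 and if longer than 448
--     # create multiple of 512 - 64 bits for the length at the end of the message (big endian)
--     if length < 448:
--         # append single 1
--         bits.append(1)
--         # fill zeros little endian wise
--         bits = fillZeros(bits, 448, 'LE')
--         # add the 64 bits representing the length of the message
--         bits = bits + message_len
--         # return as list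
--         return [bits]
--     elif 448 <= length <= 512:
--         bits.append(1)
--         # moves to next message block - total length = 1024
--         bits = fillZeros(bits, 1024, 'LE')
--         # replace the last 64 bits of the multiple of 512 with the original message length
--         bits[-64:] = message_len
--         # returns it in 512 bit chunks
--         return chunker(bits, 512)
--     else:
--         bits.append(1)
--         # loop until multiple of 512 + 64 bit message_len if message length exceeds 448 bits
--         while (len(bits) + 64) % 512 != 0:
--             bits.append(0)
--         # add the 64 bits representing the length of the message
--         bits = bits + message_len
--         # returns it in 512 bit chunks
--         return chunker(bits, 512)
-- ===== SOURCE B (Python) =====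
-- def preprocessMessage(message):
--     # uniform padding: one 1-bit, (448 - len) % 512 zeros, then the 64-bit length block
--     bits = []
--     for c in message:
--         for bit in bin(ord(c))[2:].zfill(8):
--             bits.append(int(bit))
--     length = len(bits)
--     message_len = [int(b) for b in bin(length)[2:].zfill(64)]
--     bits.append(1)
--     bits.extend([0] * ((448 - len(bits)) % 512))
--     bits.extend(message_len)
--     # one-pass chunker: accumulate 512 bits at a time
--     chunks = []
--     cur = []
--     for b in bits:
--         cur.append(b)
--         if len(cur) == 512:
--             chunks.append(cur)
--             cur = []
--     if cur:
--         chunks.append(cur)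
--     return chunks
-- ===== Notes on version B (the rewrite author's own statement) =====
-- stated objective: simpler
-- what changed: A's three-way padding dispatch (fillZeros helper, fill-to-1024 plus slice-assignment of the last 64 bits, and a while-loop padder) is collapsed into one uniform pass — append the 1 bit, append a closed-form (448 - len) % 512 count of zeros, append the 64-bit length block — and A's range/slice chunker is replaced by a one-pass accumulator chunker.
import Mathlib
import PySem

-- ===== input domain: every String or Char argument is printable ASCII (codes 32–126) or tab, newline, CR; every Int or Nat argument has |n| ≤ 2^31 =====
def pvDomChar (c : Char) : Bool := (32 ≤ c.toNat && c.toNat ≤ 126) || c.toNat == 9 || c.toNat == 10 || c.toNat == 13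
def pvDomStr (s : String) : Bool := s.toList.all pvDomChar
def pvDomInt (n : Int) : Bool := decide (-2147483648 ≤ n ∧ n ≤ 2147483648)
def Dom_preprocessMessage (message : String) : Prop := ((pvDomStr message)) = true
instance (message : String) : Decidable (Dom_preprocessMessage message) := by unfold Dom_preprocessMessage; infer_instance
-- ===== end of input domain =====

-- B replaces A's three-way padding dispatch (fillZeros / slice-replacement / while-loop) by one
-- uniform pass: append 1, append a closed-form number of zeros, append the length block, chunk.

-- ===== PORT A =====
-- int(bit) for a binary digit character (exact on '0'/'1', the only characters that occur)
def bitInt (c : Char) : Int := if c = '1' then 1 else 0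

-- bin(n)[2:]
def binDrop2 (n : Int) : List Char := PySem.List.slice (PySem.Int.toBinChars0b n) (some 2) none

def translateA (message : String) : List Int :=
  let charcodes := message.toList.map (fun c => (c.toNat : Int))            -- [ord(c) for c in message]
  let bytes := charcodes.foldl
    (fun bs ch => bs ++ [PySem.Chars.zfill (binDrop2 ch) 8]) []            -- bytes.append(bin(char)[2:].zfill(8))
  bytes.foldl (fun bits byte => bits ++ byte.map bitInt) []                -- for byte: for bit: bits.append(int(bit))

def chunker (bits : List Int) (chunk_length : Int) : List (List Int) :=
  (PySem.List.pyRange 0 (PySem.List.len bits) chunk_length).foldl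
    (fun chunked b => chunked ++ [PySem.List.slice bits (some b) (some (b + chunk_length))]) []

-- the big-endian branch of fillZeros ('while l < length: bits.insert(0, 0)'); each pass grows
-- the list by one, so (length - len(bits)).toNat steps of fuel make the loop total without changing it
def fillBEGo : Nat → List Int → Int → List Int
  | 0, bits, _ => bits
  | f+1, bits, length => if (bits.length : Int) < length then fillBEGo f (0 :: bits) length else bits

def fillBE (bits : List Int) (length : Int) : List Int :=
  fillBEGo (length - bits.length).toNat bits length

def fillZeros (bits : List Int) (length : Int) (endian : String) : List Int :=
  if endian = "LE" then
    (PySem.List.pyRange (PySem.List.len bits) length 1).foldl (fun b _ => b ++ [0]) bits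
  else fillBE bits length

-- 'while (len(bits) + 64) % 512 != 0: bits.append(0)'; each pass grows the list by one and the
-- loop stops after ((448 - len) % 512).toNat ≤ 511 passes, so 512 steps of fuel make it total
-- without changing it (padGo_eq below proves the closed form from exactly that bound)
def padGo : Nat → List Int → List Int
  | 0, bits => bits
  | f+1, bits => if (bits.length + 64) % 512 ≠ 0 then padGo f (bits ++ [0]) else bits

def padWhile (bits : List Int) : List Int := padGo 512 bits

def preprocessMessage (message : String) : List (List Int) :=
  let bits := translateA message
  let length : Int := PySem.List.len bits
  let message_len := (PySem.Chars.zfill (binDrop2 length) 64).map bitInt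
  if length < 448 then
    let bits1 := bits ++ [1]
    let bits2 := fillZeros bits1 448 "LE"
    [bits2 ++ message_len]
  else if 448 ≤ length ∧ length ≤ 512 then
    let bits1 := bits ++ [1]
    let bits2 := fillZeros bits1 1024 "LE"
    -- bits[-64:] = message_len  (slice assignment: keep everything before the last 64, then message_len)
    chunker (PySem.List.slice bits2 none (some (-64)) ++ message_len) 512
  else
    let bits1 := bits ++ [1]
    let bits2 := padWhile bits1
    chunker (bits2 ++ message_len) 512

-- ===== PORT B =====
-- one-pass chunker state: (finished chunks, current partial chunk)
def chunkStep (st : List (List Int) × List Int) (b : Int) : List (List Int) × List Int :=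
  let cur := st.2 ++ [b]
  if cur.length = 512 then (st.1 ++ [cur], ([] : List Int)) else (st.1, cur)

def chunkFold (l : List Int) : List (List Int) :=
  let r := l.foldl chunkStep ([], [])
  if r.2.isEmpty then r.1 else r.1 ++ [r.2]

def preprocessMessage_alt (message : String) : List (List Int) :=
  let bits := message.toList.flatMap (fun c => (PySem.Chars.zfill (binDrop2 (c.toNat : Int)) 8).map bitInt)
  let length : Int := (bits.length : Int)
  let message_len := (PySem.Chars.zfill (binDrop2 length) 64).map bitInt
  let bits1 := bits ++ [1]
  let bits2 := bits1 ++ List.replicate (PySem.Int.mod (448 - (bits1.length : Int)) 512).toNat 0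
  chunkFold (bits2 ++ message_len)

-- ===== PRECONDITION & SPEC =====
def Spec_preprocessMessage (message : String) (out : List (List Int)) : Prop := out = preprocessMessage_alt message
instance (message : String) (out : List (List Int)) : Decidable (Spec_preprocessMessage message out) := by unfold Spec_preprocessMessage; infer_instance

-- ===== CLAIM (what is proved, stated in full; the proofs are below) =====
def Claim_equal_preprocessMessage : Prop := ∀ (message : String), Dom_preprocessMessage message → Spec_preprocessMessage message (preprocessMessage message)

-- ===== LEMMAS AND PROOFS =====

-- proof-side reference chunker (take/drop recursion); both ports' chunkers are reduced to it
lemma chunksB_dec (x : Int) (xs : List Int) : ((x :: xs).drop 512).length < (x :: xs).length := by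
  simp only [List.length_drop, List.length_cons]; omega

def chunksB : List Int → List (List Int)
  | [] => []
  | x :: xs => ((x :: xs).take 512) :: chunksB ((x :: xs).drop 512)
termination_by l => l.length
decreasing_by exact chunksB_dec x xs

-- a full 512 chunk at the front
lemma chunksB_append_512 (c r : List Int) (hc : c.length = 512) :
    chunksB (c ++ r) = c :: chunksB r := by
  cases c with
  | nil => simp at hc
  | cons x xs =>
    rw [List.cons_append, chunksB]
    have ht : ((x :: xs) ++ r).take 512 = x :: xs := by
      rw [← hc, List.take_left]
    have hd : ((x :: xs) ++ r).drop 512 = r := by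
      rw [← hc, List.drop_left]
    rw [← List.cons_append, ht, hd]

-- the flush of the accumulator state, as its own function so the induction below is stable
def flushF (r : List (List Int) × List Int) : List (List Int) :=
  if r.2.isEmpty then r.1 else r.1 ++ [r.2]

-- the one-pass accumulator computes the reference chunking
lemma chunkFold_go (l : List Int) : ∀ (acc : List (List Int)) (cur : List Int), cur.length < 512 →
    flushF (l.foldl chunkStep (acc, cur)) = acc ++ chunksB (cur ++ l) := by
  induction l with
  | nil =>
    intro acc cur hcur
    cases hc : cur with
    | nil => simp [flushF, chunksB]
    | cons y ys =>
      subst hc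
      simp only [List.foldl_nil, List.append_nil, flushF, List.isEmpty_cons,
        if_neg Bool.false_ne_true]
      rw [chunksB]
      have ht : (y :: ys).take 512 = y :: ys := List.take_of_length_le (by omega)
      have hd : (y :: ys).drop 512 = [] := List.drop_of_length_le (by omega)
      rw [ht, hd, chunksB]
  | cons b rest ih =>
    intro acc cur hcur
    rw [List.foldl_cons, chunkStep]
    simp only []
    split_ifs with hfull
    · rw [ih (acc ++ [cur ++ [b]]) [] (by norm_num)]
      rw [show cur ++ b :: rest = (cur ++ [b]) ++ rest by simp,
        chunksB_append_512 (cur ++ [b]) rest (by simpa using hfull)]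
      simp
    · rw [ih acc (cur ++ [b]) (by
        simp only [List.length_append, List.length_cons, List.length_nil] at hfull ⊢; omega)]
      simp

lemma chunkFold_eq (l : List Int) : chunkFold l = chunksB l := by
  have := chunkFold_go l [] [] (by norm_num)
  simpa [chunkFold, flushF] using this

-- A's two-stage translateA equals B's single flatMap comprehension
lemma translate_eq (m : String) :
    translateA m = m.toList.flatMap (fun c => (PySem.Chars.zfill (binDrop2 (c.toNat : Int)) 8).map bitInt) := by
  simp only [translateA]
  rw [PySem.List.foldl_append_singleton_eq_map, PySem.List.foldl_append_eq_flatMap]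
  simp [List.flatMap_map, Function.comp]

-- the LE fill loop appends zeros
lemma fill_le_eq (bits : List Int) (length : Int) :
    fillZeros bits length "LE" = bits ++ List.replicate (length - bits.length).toNat 0 := by
  simp only [fillZeros, if_true]
  rw [PySem.List.foldl_append_singleton_eq_map (fun _ => (0:Int))]
  simp [List.map_const', PySem.List.length_pyRange_one]

-- the while-padding loop in closed form
lemma padGo_eq (f : Nat) (l : List Int) (h : ((448 - (l.length : Int)) % 512).toNat ≤ f) :
    padGo f l = l ++ List.replicate (((448 - (l.length : Int)) % 512).toNat) 0 := by
  induction f generalizing l with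
  | zero =>
    have h0 : ((448 - (l.length : Int)) % 512).toNat = 0 := by omega
    simp [padGo, h0]
  | succ f ih =>
    rw [padGo]
    split_ifs with hc
    · rw [ih (l ++ [0]) (by simp only [List.length_append, List.length_cons, List.length_nil]; omega)]
      have h1 : ((448 - ((l ++ [0]).length : Int)) % 512).toNat + 1 = ((448 - (l.length : Int)) % 512).toNat := by
        simp only [List.length_append, List.length_cons, List.length_nil]; omega
      rw [← h1, List.append_assoc]
      simp [List.replicate_succ]
    · have h0 : ((448 - (l.length : Int)) % 512).toNat = 0 := by omega
      simp [h0]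

lemma padWhile_eq (l : List Int) :
    padWhile l = l ++ List.replicate (((448 - (l.length : Int)) % 512).toNat) 0 := by
  exact padGo_eq 512 l (by omega)

-- A's range/slice chunker equals B's take/drop recursion
lemma mapChunks (l : List Int) :
    (List.range ((l.length + 511)/512)).map (fun k => (l.drop (512*k)).take 512) = chunksB l := by
  fun_induction chunksB l with
  | case1 => simp
  | case2 x xs ih =>
    have hlen : ((x::xs).length + 511)/512 = (((x::xs).drop 512).length + 511)/512 + 1 := by
      simp only [List.length_drop, List.length_cons]; omega
    rw [hlen, List.range_succ_eq_map, List.map_cons, List.map_map]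
    refine congrArg₂ List.cons (by simp) ?_
    rw [← ih]
    apply List.map_congr_left
    intro k _
    simp only [Function.comp_apply, List.drop_drop]
    congr 2
    omega

lemma chunker_eq (l : List Int) : chunker l 512 = chunksB l := by
  simp only [chunker, PySem.List.len_eq]
  rw [PySem.List.foldl_append_singleton_eq_map, PySem.List.pyRange_of_pos 0 _ (by norm_num)]
  simp only [List.nil_append, List.map_map]
  have hcnt : (if (0:Int) < (l.length:Int) then (((l.length:Int) - 0 + 512 - 1)/512).toNat else 0) = (l.length + 511)/512 := by
    split <;> omega
  rw [hcnt, ← mapChunks]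
  apply List.map_congr_left
  intro k _
  simp only [Function.comp_apply]
  have h1 : (0 : Int) + 512 * (k : Int) = ((512*k : Nat) : Int) := by push_cast; ring
  have h2 : ((512*k : Nat) : Int) + 512 = ((512*k + 512 : Nat) : Int) := by push_cast; ring
  rw [h1, h2, PySem.List.slice_natCast]
  congr 1
  omega

-- bin(n)[2:] on a natural number is just the binary digit list
lemma binDrop2_natCast (n : Nat) : binDrop2 (n : Int) = Nat.toDigits 2 n := by
  unfold binDrop2
  simp [pysem, PySem.Int.toBinChars0b]
  rfl

lemma toDigits_len_le (m : Nat) (h : m < 2^64) : (Nat.toDigits 2 m).length ≤ 64 := by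
  have := Nat.toDigitsCore_length 2 (m+1) m 64 (by norm_num) (by exact_mod_cast h)
  simpa [Nat.toDigits] using this

-- a nonempty list of at most 512 elements is a single chunk
lemma chunksB_single (l : List Int) (h1 : l ≠ []) (h2 : l.length ≤ 512) : chunksB l = [l] := by
  cases l with
  | nil => exact absurd rfl h1
  | cons x xs =>
    rw [chunksB]
    have ht : (x :: xs).take 512 = x :: xs := List.take_of_length_le h2
    have hd : (x :: xs).drop 512 = [] := List.drop_of_length_le h2
    rw [ht, hd, chunksB]

theorem preprocessMessage_spec_aux (m : String) :
    preprocessMessage m = preprocessMessage_alt m := by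
  simp only [preprocessMessage, preprocessMessage_alt, ← translate_eq, PySem.List.len_eq,
    List.length_append, List.length_cons, List.length_nil, Nat.zero_add,
    Nat.cast_add, Nat.cast_one]
  set bits := translateA m with hb
  set n := bits.length with hn
  set ml := (PySem.Chars.zfill (binDrop2 (n : Int)) 64).map bitInt with hml
  have hmod : PySem.Int.mod (448 - ((n:Int)+1)) 512 = (448 - ((n:Int)+1)) % 512 :=
    PySem.Int.mod_eq_emod_of_pos (by norm_num)
  rw [hmod, chunkFold_eq]
  split_ifs with hlt hmid
  · -- length < 448 : one 512-bit block
    rw [fill_le_eq]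
    simp only [List.length_append, List.length_cons, List.length_nil, Nat.zero_add,
      Nat.cast_add, Nat.cast_one]
    have hZ : ((448 - ((n:Int) + 1)) % 512).toNat = (448 - ((n:Int) + 1)).toNat := by omega
    have hml64 : ml.length = 64 := by
      rw [hml, List.length_map, PySem.Chars.length_zfill, binDrop2_natCast]
      have := toDigits_len_le n (by omega)
      omega
    rw [hZ]
    rw [chunksB_single _ (by simp) (by
      simp only [List.length_append, List.length_cons, List.length_nil, List.length_replicate, hml64]
      omega)]
  · -- 448 ≤ length ≤ 512 : fill to 1024, slice assignment of the last 64
    rw [fill_le_eq, chunker_eq]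
    simp only [List.length_append, List.length_cons, List.length_nil, Nat.zero_add,
      Nat.cast_add, Nat.cast_one]
    apply congrArg chunksB
    have hK : ((1024:Int) - ((n:Int)+1)).toNat = 1023 - n := by omega
    have hZ : ((448 - ((n:Int) + 1)) % 512).toNat = 959 - n := by omega
    rw [hK, hZ, PySem.List.slice_to_neg_ofNat _ 64 (by norm_num)]
    have hlen : ((bits ++ [1]) ++ List.replicate (1023 - n) 0).length = 1024 := by
      simp only [List.length_append, List.length_cons, List.length_nil, List.length_replicate]
      omega
    rw [hlen]
    have h960 : (1024:Nat) - 64 = 960 := by norm_num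
    rw [h960, List.take_append, List.take_of_length_le (by
      simp only [List.length_append, List.length_cons, List.length_nil]; omega),
      List.take_replicate]
    have hmin : min (960 - (bits ++ [1]).length) (1023 - n) = 959 - n := by
      simp only [List.length_append, List.length_cons, List.length_nil]
      omega
    rw [hmin]
  · -- length > 512 : the while-loop padding is the closed form
    rw [padWhile_eq, chunker_eq]
    simp only [List.length_append, List.length_cons, List.length_nil, Nat.zero_add,
      Nat.cast_add, Nat.cast_one]
    rfl

-- ===== VERDICT (by name: the statement is the Claim_ definition above) =====
theorem preprocessMessage_spec : Claim_equal_preprocessMessage := by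
  intro m _
  exact preprocessMessage_spec_aux m
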